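-- pv_equiv track=rewrite | github.com/yawnoc/yawnoc.github.io | sun-tzu/code/baby.py | deduce_sex
-- ===== SOURCE A (Python) =====
-- LETTER_MALE = 'M'
--
-- LETTER_FEMALE = 'F'
--
-- def deduce_sex(years, months):
--     # 術曰、置四十九、加難月、減行年。
--     remainder = 49 + months - years
--     if remainder <= 0:
--         return None, None, None
--
--     # 所餘、以天除一、地除二、人除三、
--     # 四時除四、五行除五、六律除六、七星除七、八風除八、九州除九。
--     last_subtrahend = 0
--     for subtrahend in range(1, 1+9):
--         if remainder > subtrahend:
--             remainder = remainder - subtrahend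
--             last_subtrahend = subtrahend
--         else:
--             break
--
--     # 其不盡者、奇則為男、耦則為女。
--     if remainder % 2 == 1:
--         sex_letter = LETTER_MALE
--     else:
--         sex_letter = LETTER_FEMALE
--
--     return sex_letter, remainder, last_subtrahend
-- ===== SOURCE B (Python) =====
-- LETTER_MALE = 'M'
--
-- LETTER_FEMALE = 'F'
--
-- # Triangular numbers T(1)..T(9): after k completed subtractions the loop has
-- # removed T(k), and step k happens exactly when T(k) < initial remainder.
-- TRIANGULARS = (1, 3, 6, 10, 15, 21, 28, 36, 45)
--
-- def deduce_sex(years, months):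
--     remainder = 49 + months - years
--     if remainder <= 0:
--         return None, None, None
--     k = sum(1 for t in TRIANGULARS if t < remainder)
--     remainder -= k * (k + 1) // 2
--     sex_letter = LETTER_MALE if remainder % 2 == 1 else LETTER_FEMALE
--     return sex_letter, remainder, k
-- ===== Notes on version B (the rewrite author's own statement) =====
-- stated objective: simpler
-- what changed: Replaces the subtract-while-greater loop over subtrahends 1..9 by counting, in a fixed table, the triangular numbers below the remainder and subtracting the corresponding triangular sum k*(k+1)//2 in one step.
import Mathlib
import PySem

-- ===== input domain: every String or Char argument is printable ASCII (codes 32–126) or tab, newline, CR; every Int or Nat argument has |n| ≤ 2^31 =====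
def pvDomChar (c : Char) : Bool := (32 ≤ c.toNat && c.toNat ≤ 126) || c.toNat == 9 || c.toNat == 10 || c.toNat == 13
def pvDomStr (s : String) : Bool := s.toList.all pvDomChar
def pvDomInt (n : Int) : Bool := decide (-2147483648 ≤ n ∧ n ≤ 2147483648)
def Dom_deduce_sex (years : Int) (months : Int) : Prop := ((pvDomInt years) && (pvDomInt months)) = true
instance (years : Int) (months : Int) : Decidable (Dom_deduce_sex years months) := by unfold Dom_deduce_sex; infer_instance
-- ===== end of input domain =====

-- B replaces A's subtract-and-break loop by counting (in a fixed table) the triangular numbers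
-- below the remainder and removing the corresponding triangular sum in one step (objective: simpler).


-- ===== PORT A =====
-- the for-loop with break: state = (remainder, last_subtrahend), over the remaining subtrahends
def deduceLoop (remainder last : Int) : List Int → Int × Int
  | [] => (remainder, last)
  | s :: rest => if remainder > s then deduceLoop (remainder - s) s rest else (remainder, last)

def deduce_sex (years : Int) (months : Int) : Option String × Option Int × Option Int :=
  let remainder := 49 + months - years
  if remainder ≤ 0 then (none, none, none)
  else
    let p := deduceLoop remainder 0 (PySem.List.pyRange 1 10 1)
    let sex_letter := if PySem.Int.mod p.1 2 = 1 then "M" else "F"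
    (some sex_letter, some p.1, some p.2)

-- ===== PORT B =====
def triangulars : List Int := [1, 3, 6, 10, 15, 21, 28, 36, 45]

def deduce_sex_alt (years : Int) (months : Int) : Option String × Option Int × Option Int :=
  let remainder := 49 + months - years
  if remainder ≤ 0 then (none, none, none)
  else
    let k : Int := triangulars.foldl (fun acc t => if t < remainder then acc + 1 else acc) 0
    let rem := remainder - PySem.Int.floordiv (k * (k + 1)) 2
    let sex_letter := if PySem.Int.mod rem 2 = 1 then "M" else "F"
    (some sex_letter, some rem, some k)

-- ===== PRECONDITION & SPEC =====
def Spec_deduce_sex (years : Int) (months : Int) (out : Option String × Option Int × Option Int) : Prop := out = deduce_sex_alt years months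
instance (years : Int) (months : Int) (out : Option String × Option Int × Option Int) : Decidable (Spec_deduce_sex years months out) := by unfold Spec_deduce_sex; infer_instance

-- ===== CLAIM (what is proved, stated in full; the proofs are below) =====
def Claim_equal_deduce_sex : Prop := ∀ (years : Int) (months : Int), Dom_deduce_sex years months → Spec_deduce_sex years months (deduce_sex years months)

-- ===== LEMMAS AND PROOFS =====

-- A's loop result, for positive r, as a function of B's count of triangular numbers below r
lemma deduceLoop_eq (r : Int) (hr : 0 < r) :
    deduceLoop r 0 [1, 2, 3, 4, 5, 6, 7, 8, 9] =
      (r - PySem.Int.floordiv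
            ((triangulars.foldl (fun acc t => if t < r then acc + 1 else acc) 0) *
             ((triangulars.foldl (fun acc t => if t < r then acc + 1 else acc) 0) + 1)) 2,
       triangulars.foldl (fun acc t => if t < r then acc + 1 else acc) 0) := by
  rcases (by omega : r ≤ 1 ∨ (1 < r ∧ r ≤ 3) ∨ (3 < r ∧ r ≤ 6) ∨ (6 < r ∧ r ≤ 10) ∨ (10 < r ∧ r ≤ 15) ∨ (15 < r ∧ r ≤ 21) ∨ (21 < r ∧ r ≤ 28) ∨ (28 < r ∧ r ≤ 36) ∨ (36 < r ∧ r ≤ 45) ∨ 45 < r) with h|⟨h,h2⟩|⟨h,h2⟩|⟨h,h2⟩|⟨h,h2⟩|⟨h,h2⟩|⟨h,h2⟩|⟨h,h2⟩|⟨h,h2⟩|h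

  · simp only [deduceLoop, triangulars, List.foldl,
      PySem.Int.floordiv_eq_ediv_of_pos (by norm_num : (0:Int) < 2),
      (show ¬((1:Int) < r) by omega),
      (show ¬((1:Int) < r) by omega),
      (show ¬((3:Int) < r) by omega),
      (show ¬((6:Int) < r) by omega),
      (show ¬((10:Int) < r) by omega),
      (show ¬((15:Int) < r) by omega),
      (show ¬((21:Int) < r) by omega),
      (show ¬((28:Int) < r) by omega),
      (show ¬((36:Int) < r) by omega),
      (show ¬((45:Int) < r) by omega), if_true, if_false, ite_true, ite_false, Prod.mk.injEq]
    exact ⟨by omega, by first | rfl | trivial⟩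
  · simp only [deduceLoop, triangulars, List.foldl,
      PySem.Int.floordiv_eq_ediv_of_pos (by norm_num : (0:Int) < 2),
      (show (1:Int) < r by omega),
      (show ¬((2:Int) < r - 1) by omega),
      (show (1:Int) < r by omega),
      (show ¬((3:Int) < r) by omega),
      (show ¬((6:Int) < r) by omega),
      (show ¬((10:Int) < r) by omega),
      (show ¬((15:Int) < r) by omega),
      (show ¬((21:Int) < r) by omega),
      (show ¬((28:Int) < r) by omega),
      (show ¬((36:Int) < r) by omega),
      (show ¬((45:Int) < r) by omega), if_true, if_false, ite_true, ite_false, Prod.mk.injEq]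
    exact ⟨by omega, by first | rfl | trivial⟩
  · simp only [deduceLoop, triangulars, List.foldl,
      PySem.Int.floordiv_eq_ediv_of_pos (by norm_num : (0:Int) < 2),
      (show (1:Int) < r by omega),
      (show (2:Int) < r - 1 by omega),
      (show ¬((3:Int) < r - 1 - 2) by omega),
      (show (1:Int) < r by omega),
      (show (3:Int) < r by omega),
      (show ¬((6:Int) < r) by omega),
      (show ¬((10:Int) < r) by omega),
      (show ¬((15:Int) < r) by omega),
      (show ¬((21:Int) < r) by omega),
      (show ¬((28:Int) < r) by omega),
      (show ¬((36:Int) < r) by omega),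
      (show ¬((45:Int) < r) by omega), if_true, if_false, ite_true, ite_false, Prod.mk.injEq]
    exact ⟨by omega, by first | rfl | trivial⟩
  · simp only [deduceLoop, triangulars, List.foldl,
      PySem.Int.floordiv_eq_ediv_of_pos (by norm_num : (0:Int) < 2),
      (show (1:Int) < r by omega),
      (show (2:Int) < r - 1 by omega),
      (show (3:Int) < r - 1 - 2 by omega),
      (show ¬((4:Int) < r - 1 - 2 - 3) by omega),
      (show (1:Int) < r by omega),
      (show (3:Int) < r by omega),
      (show (6:Int) < r by omega),
      (show ¬((10:Int) < r) by omega),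
      (show ¬((15:Int) < r) by omega),
      (show ¬((21:Int) < r) by omega),
      (show ¬((28:Int) < r) by omega),
      (show ¬((36:Int) < r) by omega),
      (show ¬((45:Int) < r) by omega), if_true, if_false, ite_true, ite_false, Prod.mk.injEq]
    exact ⟨by omega, by first | rfl | trivial⟩
  · simp only [deduceLoop, triangulars, List.foldl,
      PySem.Int.floordiv_eq_ediv_of_pos (by norm_num : (0:Int) < 2),
      (show (1:Int) < r by omega),
      (show (2:Int) < r - 1 by omega),
      (show (3:Int) < r - 1 - 2 by omega),
      (show (4:Int) < r - 1 - 2 - 3 by omega),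
      (show ¬((5:Int) < r - 1 - 2 - 3 - 4) by omega),
      (show (1:Int) < r by omega),
      (show (3:Int) < r by omega),
      (show (6:Int) < r by omega),
      (show (10:Int) < r by omega),
      (show ¬((15:Int) < r) by omega),
      (show ¬((21:Int) < r) by omega),
      (show ¬((28:Int) < r) by omega),
      (show ¬((36:Int) < r) by omega),
      (show ¬((45:Int) < r) by omega), if_true, if_false, ite_true, ite_false, Prod.mk.injEq]
    exact ⟨by omega, by first | rfl | trivial⟩
  · simp only [deduceLoop, triangulars, List.foldl,
      PySem.Int.floordiv_eq_ediv_of_pos (by norm_num : (0:Int) < 2),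
      (show (1:Int) < r by omega),
      (show (2:Int) < r - 1 by omega),
      (show (3:Int) < r - 1 - 2 by omega),
      (show (4:Int) < r - 1 - 2 - 3 by omega),
      (show (5:Int) < r - 1 - 2 - 3 - 4 by omega),
      (show ¬((6:Int) < r - 1 - 2 - 3 - 4 - 5) by omega),
      (show (1:Int) < r by omega),
      (show (3:Int) < r by omega),
      (show (6:Int) < r by omega),
      (show (10:Int) < r by omega),
      (show (15:Int) < r by omega),
      (show ¬((21:Int) < r) by omega),
      (show ¬((28:Int) < r) by omega),
      (show ¬((36:Int) < r) by omega),
      (show ¬((45:Int) < r) by omega), if_true, if_false, ite_true, ite_false, Prod.mk.injEq]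
    exact ⟨by omega, by first | rfl | trivial⟩
  · simp only [deduceLoop, triangulars, List.foldl,
      PySem.Int.floordiv_eq_ediv_of_pos (by norm_num : (0:Int) < 2),
      (show (1:Int) < r by omega),
      (show (2:Int) < r - 1 by omega),
      (show (3:Int) < r - 1 - 2 by omega),
      (show (4:Int) < r - 1 - 2 - 3 by omega),
      (show (5:Int) < r - 1 - 2 - 3 - 4 by omega),
      (show (6:Int) < r - 1 - 2 - 3 - 4 - 5 by omega),
      (show ¬((7:Int) < r - 1 - 2 - 3 - 4 - 5 - 6) by omega),
      (show (1:Int) < r by omega),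
      (show (3:Int) < r by omega),
      (show (6:Int) < r by omega),
      (show (10:Int) < r by omega),
      (show (15:Int) < r by omega),
      (show (21:Int) < r by omega),
      (show ¬((28:Int) < r) by omega),
      (show ¬((36:Int) < r) by omega),
      (show ¬((45:Int) < r) by omega), if_true, if_false, ite_true, ite_false, Prod.mk.injEq]
    exact ⟨by omega, by first | rfl | trivial⟩
  · simp only [deduceLoop, triangulars, List.foldl,
      PySem.Int.floordiv_eq_ediv_of_pos (by norm_num : (0:Int) < 2),
      (show (1:Int) < r by omega),
      (show (2:Int) < r - 1 by omega),
      (show (3:Int) < r - 1 - 2 by omega),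
      (show (4:Int) < r - 1 - 2 - 3 by omega),
      (show (5:Int) < r - 1 - 2 - 3 - 4 by omega),
      (show (6:Int) < r - 1 - 2 - 3 - 4 - 5 by omega),
      (show (7:Int) < r - 1 - 2 - 3 - 4 - 5 - 6 by omega),
      (show ¬((8:Int) < r - 1 - 2 - 3 - 4 - 5 - 6 - 7) by omega),
      (show (1:Int) < r by omega),
      (show (3:Int) < r by omega),
      (show (6:Int) < r by omega),
      (show (10:Int) < r by omega),
      (show (15:Int) < r by omega),
      (show (21:Int) < r by omega),
      (show (28:Int) < r by omega),
      (show ¬((36:Int) < r) by omega),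
      (show ¬((45:Int) < r) by omega), if_true, if_false, ite_true, ite_false, Prod.mk.injEq]
    exact ⟨by omega, by first | rfl | trivial⟩
  · simp only [deduceLoop, triangulars, List.foldl,
      PySem.Int.floordiv_eq_ediv_of_pos (by norm_num : (0:Int) < 2),
      (show (1:Int) < r by omega),
      (show (2:Int) < r - 1 by omega),
      (show (3:Int) < r - 1 - 2 by omega),
      (show (4:Int) < r - 1 - 2 - 3 by omega),
      (show (5:Int) < r - 1 - 2 - 3 - 4 by omega),
      (show (6:Int) < r - 1 - 2 - 3 - 4 - 5 by omega),
      (show (7:Int) < r - 1 - 2 - 3 - 4 - 5 - 6 by omega),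
      (show (8:Int) < r - 1 - 2 - 3 - 4 - 5 - 6 - 7 by omega),
      (show ¬((9:Int) < r - 1 - 2 - 3 - 4 - 5 - 6 - 7 - 8) by omega),
      (show (1:Int) < r by omega),
      (show (3:Int) < r by omega),
      (show (6:Int) < r by omega),
      (show (10:Int) < r by omega),
      (show (15:Int) < r by omega),
      (show (21:Int) < r by omega),
      (show (28:Int) < r by omega),
      (show (36:Int) < r by omega),
      (show ¬((45:Int) < r) by omega), if_true, if_false, ite_true, ite_false, Prod.mk.injEq]
    exact ⟨by omega, by first | rfl | trivial⟩
  · simp only [deduceLoop, triangulars, List.foldl,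
      PySem.Int.floordiv_eq_ediv_of_pos (by norm_num : (0:Int) < 2),
      (show (1:Int) < r by omega),
      (show (2:Int) < r - 1 by omega),
      (show (3:Int) < r - 1 - 2 by omega),
      (show (4:Int) < r - 1 - 2 - 3 by omega),
      (show (5:Int) < r - 1 - 2 - 3 - 4 by omega),
      (show (6:Int) < r - 1 - 2 - 3 - 4 - 5 by omega),
      (show (7:Int) < r - 1 - 2 - 3 - 4 - 5 - 6 by omega),
      (show (8:Int) < r - 1 - 2 - 3 - 4 - 5 - 6 - 7 by omega),
      (show (9:Int) < r - 1 - 2 - 3 - 4 - 5 - 6 - 7 - 8 by omega),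
      (show (1:Int) < r by omega),
      (show (3:Int) < r by omega),
      (show (6:Int) < r by omega),
      (show (10:Int) < r by omega),
      (show (15:Int) < r by omega),
      (show (21:Int) < r by omega),
      (show (28:Int) < r by omega),
      (show (36:Int) < r by omega),
      (show (45:Int) < r by omega), if_true, if_false, ite_true, ite_false, Prod.mk.injEq]
    exact ⟨by omega, by first | rfl | trivial⟩

-- ===== VERDICT (by name: the statement is the Claim_ definition above) =====
theorem deduce_sex_spec : Claim_equal_deduce_sex := by
  intro years months _
  unfold Spec_deduce_sex deduce_sex deduce_sex_alt
  by_cases h : 49 + months - years ≤ 0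
  · simp [h]
  · simp only [h, if_false, ite_false]
    rw [show PySem.List.pyRange 1 10 1 = [1,2,3,4,5,6,7,8,9] from by decide,
      deduceLoop_eq _ (by omega)]
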